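-- pv_equiv track=rewrite | github.com/Domtexe/ShrimpDev-Public | tools/R2823.py | upsert_key
-- ===== SOURCE A (Python) =====
-- def upsert_key(lines, section, key, value):
--     # minimal INI editor, preserves most formatting
--     sec = f"[{section}]".lower()
--     in_sec = False
--     wrote = False
--     out = []
--     for i, ln in enumerate(lines):
--         s = ln.strip()
--         if s.startswith("[") and s.endswith("]"):
--             if in_sec and not wrote:
--                 out.append(f"{key} = {value}\n")
--                 wrote = True
--             in_sec = (s.lower() == sec)
--             out.append(ln)
--             continue
--         if in_sec and s.lower().startswith(key.lower() + " "):
--             out.append(f"{key} = {value}\n")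
--             wrote = True
--         else:
--             out.append(ln)
--     if in_sec and not wrote:
--         out.append(f"{key} = {value}\n")
--     return out, wrote
-- ===== SOURCE B (Python) =====
-- def upsert_key(lines, section, key, value):
--     # block-structured rewrite: split into preamble + header-led blocks, rewrite target blocks
--     sec = f"[{section}]".lower()
--     newline = f"{key} = {value}\n"
--     pref = key.lower() + " "
--
--     def is_header(ln):
--         s = ln.strip()
--         return s.startswith("[") and s.endswith("]")
--
--     def split_at_header(ls):
--         # (chunk of lines before the first header, remainder starting at that header)
--         for i, ln in enumerate(ls):
--             if is_header(ln):
--                 return ls[:i], ls[i:]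
--         return ls, []
--
--     def repl_body(body, wrote):
--         out = []
--         for ln in body:
--             if ln.strip().lower().startswith(pref):
--                 out.append(newline)
--                 wrote = True
--             else:
--                 out.append(ln)
--         return out, wrote
--
--     def go(rest, wrote):
--         # rest is empty or starts with a header line
--         if not rest:
--             return [], wrote
--         hdr = rest[0]
--         body, rest2 = split_at_header(rest[1:])
--         if hdr.strip().lower() == sec:
--             out, wrote = repl_body(body, wrote)
--             if not wrote:
--                 out.append(newline)
--                 wrote = True
--         else:
--             out = body
--         tail, wrote = go(rest2, wrote)
--         return [hdr] + out + tail, wrote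
--
--     preamble, rest = split_at_header(lines)
--     tail, wrote = go(rest, False)
--     return preamble + tail, wrote
-- ===== Notes on version B (the rewrite author's own statement) =====
-- stated objective: alternative
-- what changed: B first partitions the lines into a preamble plus header-led blocks (split at header lines) and reassembles block by block with a global wrote flag, instead of A's single-pass in_sec/wrote state machine over individual lines.
-- intended difference: When the last header line is the target section, no earlier header is the target and no line after it matches the key, A appends the new key line at EOF but still returns wrote=False, while B returns the same list with wrote=True, which is the intended flag since the key line was written. — e.g. on upsert_key(["[s]\n"], "s", "k", "v"): A returns (["[s]\n", "k = v\n"], false), B returns (["[s]\n", "k = v\n"], true)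
import Mathlib
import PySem

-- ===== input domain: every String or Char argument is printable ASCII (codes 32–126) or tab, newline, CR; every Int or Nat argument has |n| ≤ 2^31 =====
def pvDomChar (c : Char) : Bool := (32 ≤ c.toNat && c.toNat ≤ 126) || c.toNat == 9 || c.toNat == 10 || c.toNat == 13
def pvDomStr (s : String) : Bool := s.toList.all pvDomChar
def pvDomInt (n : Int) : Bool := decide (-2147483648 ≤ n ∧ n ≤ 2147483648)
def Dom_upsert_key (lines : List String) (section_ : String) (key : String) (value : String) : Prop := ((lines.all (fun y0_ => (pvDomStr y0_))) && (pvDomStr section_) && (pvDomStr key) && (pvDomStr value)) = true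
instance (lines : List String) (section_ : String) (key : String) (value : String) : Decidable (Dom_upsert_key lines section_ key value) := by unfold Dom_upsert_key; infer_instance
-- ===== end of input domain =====

-- B rewrites the file as a preamble plus header-led blocks instead of A's per-line state machine;
-- equivalence is about the RETURN value (neither version mutates its arguments).

-- ===== PORT A =====
-- A's header test on the stripped line (s.startswith("[") and s.endswith("]"))
def pvHdrTest (s : String) : Bool :=
  PySem.Str.startswith s "[" && PySem.Str.endswith s "]"

-- A's per-line section test (s.lower() == sec) and key test (s.lower().startswith(pref))
def pvSecTest (sec s : String) : Bool := PySem.Str.lower s == sec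
def pvKeyTest (pref s : String) : Bool := PySem.Str.startswith (PySem.Str.lower s) pref

def upsertLoopA (sec nl pref : String) : List String → Bool → Bool → List String × Bool
  | [], in_sec, wrote => (if in_sec && !wrote then [nl] else [], wrote)
  | ln :: rest, in_sec, wrote =>
    let s := PySem.Str.strip ln
    if pvHdrTest s then
      let ins := if in_sec && !wrote then [nl] else []
      let wrote' := if in_sec && !wrote then true else wrote
      let r := upsertLoopA sec nl pref rest (pvSecTest sec s) wrote'
      (ins ++ ln :: r.1, r.2)
    else if in_sec && pvKeyTest pref s then
      let r := upsertLoopA sec nl pref rest in_sec true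
      (nl :: r.1, r.2)
    else
      let r := upsertLoopA sec nl pref rest in_sec wrote
      (ln :: r.1, r.2)

def upsert_key (lines : List String) (section_ : String) (key : String) (value : String) : List String × Bool :=
  let sec := PySem.Str.lower ("[" ++ section_ ++ "]")
  let nl := key ++ " = " ++ value ++ "\n"
  let pref := PySem.Str.lower key ++ " "
  upsertLoopA sec nl pref lines false false

-- ===== PORT B =====
def pvIsHeaderB (ln : String) : Bool := pvHdrTest (PySem.Str.strip ln)

def pvSplitAtHeader : List String → List String × List String
  | [] => ([], [])
  | ln :: ls =>
    if pvIsHeaderB ln then ([], ln :: ls)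
    else
      let r := pvSplitAtHeader ls
      (ln :: r.1, r.2)

-- needed by pvGoB's termination
theorem pvSplitAtHeader_length_le : ∀ ls : List String, (pvSplitAtHeader ls).2.length ≤ ls.length := by
  intro ls
  induction ls with
  | nil => simp [pvSplitAtHeader]
  | cons a t ih =>
    simp only [pvSplitAtHeader]
    split
    · simp
    · simpa using Nat.le_succ_of_le ih

def pvReplBody (nl pref : String) : List String → Bool → List String × Bool
  | [], wrote => ([], wrote)
  | ln :: body, wrote =>
    if pvKeyTest pref (PySem.Str.strip ln) then
      let r := pvReplBody nl pref body true
      (nl :: r.1, r.2)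
    else
      let r := pvReplBody nl pref body wrote
      (ln :: r.1, r.2)

def pvGoB (sec nl pref : String) : List String → Bool → List String × Bool
  | [], wrote => ([], wrote)
  | hdr :: rest1, wrote =>
    let sp := pvSplitAtHeader rest1
    if pvSecTest sec (PySem.Str.strip hdr) then
      let rb := pvReplBody nl pref sp.1 wrote
      let ob := if rb.2 then rb.1 else rb.1 ++ [nl]
      let w1 := if rb.2 then rb.2 else true
      let rt := pvGoB sec nl pref sp.2 w1
      (hdr :: (ob ++ rt.1), rt.2)
    else
      let rt := pvGoB sec nl pref sp.2 wrote
      (hdr :: (sp.1 ++ rt.1), rt.2)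
termination_by ls _ => ls.length
decreasing_by all_goals (simp only [List.length_cons]; exact Nat.lt_succ_of_le (pvSplitAtHeader_length_le rest1))

def upsert_key_alt (lines : List String) (section_ : String) (key : String) (value : String) : List String × Bool :=
  let sec := PySem.Str.lower ("[" ++ section_ ++ "]")
  let nl := key ++ " = " ++ value ++ "\n"
  let pref := PySem.Str.lower key ++ " "
  let pr := pvSplitAtHeader lines
  let r := pvGoB sec nl pref pr.2 false
  (pr.1 ++ r.1, r.2)

-- ===== PRECONDITION & SPEC =====
-- When the last header line is the target section, no earlier header is the target and no line after
-- it matches the key, A appends the new key line at EOF but still returns wrote=False, while B returns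
-- the same list with wrote=True, which is the intended flag since the key line was written.
def D_upsert_key (lines : List String) (section_ : String) (key : String) (value : String) : Prop :=
  let sec := PySem.Str.lower ("[" ++ section_ ++ "]")
  let pref := PySem.Str.lower key ++ " "
  let rest := lines.reverse.dropWhile (fun l => !pvHdrTest (PySem.Str.strip l))
  rest ≠ [] ∧ (pvSecTest sec (PySem.Str.strip rest.headI)
      && rest.tail.all (fun l => !(pvHdrTest (PySem.Str.strip l) && pvSecTest sec (PySem.Str.strip l)))
      && (lines.reverse.takeWhile (fun l => !pvHdrTest (PySem.Str.strip l))).all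
           (fun l => !pvKeyTest pref (PySem.Str.strip l))) = true
instance (lines : List String) (section_ : String) (key : String) (value : String) : Decidable (D_upsert_key lines section_ key value) := by unfold D_upsert_key; infer_instance

def Spec_upsert_key (lines : List String) (section_ : String) (key : String) (value : String) (out : List String × Bool) : Prop := ¬ D_upsert_key lines section_ key value → out = upsert_key_alt lines section_ key value
instance (lines : List String) (section_ : String) (key : String) (value : String) (out : List String × Bool) : Decidable (Spec_upsert_key lines section_ key value out) := by unfold Spec_upsert_key; infer_instance

def pvDiffWitness_upsert_key : List String × String × String × String := (["[s]\n"], "s", "k", "v")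
def pvDiffWitnessOut_upsert_key : (List String × Bool) × (List String × Bool) :=
  ((["[s]\n", "k = v\n"], false), (["[s]\n", "k = v\n"], true))

-- ===== CLAIM (what is proved, stated in full; the proofs are below) =====
def Claim_unchanged_upsert_key : Prop := ∀ (lines : List String) (section_ : String) (key : String) (value : String), Dom_upsert_key lines section_ key value → Spec_upsert_key lines section_ key value (upsert_key lines section_ key value)
def Claim_changed_upsert_key : Prop := Dom_upsert_key (pvDiffWitness_upsert_key.1) (pvDiffWitness_upsert_key.2.1) (pvDiffWitness_upsert_key.2.2.1) (pvDiffWitness_upsert_key.2.2.2) ∧ D_upsert_key (pvDiffWitness_upsert_key.1) (pvDiffWitness_upsert_key.2.1) (pvDiffWitness_upsert_key.2.2.1) (pvDiffWitness_upsert_key.2.2.2) ∧ upsert_key (pvDiffWitness_upsert_key.1) (pvDiffWitness_upsert_key.2.1) (pvDiffWitness_upsert_key.2.2.1) (pvDiffWitness_upsert_key.2.2.2) = pvDiffWitnessOut_upsert_key.1 ∧ upsert_key_alt (pvDiffWitness_upsert_key.1) (pvDiffWitness_upsert_key.2.1) (pvDiffWitness_upsert_key.2.2.1) (pvDiffWitness_upsert_key.2.2.2)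 = pvDiffWitnessOut_upsert_key.2 ∧ pvDiffWitnessOut_upsert_key.1 ≠ pvDiffWitnessOut_upsert_key.2
def Claim_exact_upsert_key : Prop := ∀ (lines : List String) (section_ : String) (key : String) (value : String), Dom_upsert_key lines section_ key value → D_upsert_key lines section_ key value → upsert_key lines section_ key value ≠ upsert_key_alt lines section_ key value

-- ===== LEMMAS AND PROOFS =====

-- B-side composites, as seen from A's two loop modes
def pvBF (sec nl pref : String) (ls : List String) (w : Bool) : List String × Bool :=
  ((pvSplitAtHeader ls).1 ++ (pvGoB sec nl pref (pvSplitAtHeader ls).2 w).1,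
   (pvGoB sec nl pref (pvSplitAtHeader ls).2 w).2)

def pvBT (sec nl pref : String) (ls : List String) (w : Bool) : List String × Bool :=
  let sp := pvSplitAtHeader ls
  let rb := pvReplBody nl pref sp.1 w
  let w1 := if rb.2 then rb.2 else true
  ((if rb.2 then rb.1 else rb.1 ++ [nl]) ++ (pvGoB sec nl pref sp.2 w1).1,
   (pvGoB sec nl pref sp.2 w1).2)

-- the flag-discrepancy tracker: true exactly when A's loop performs the EOF append (which does not set wrote)
def pvE (sec pref : String) : List String → Bool → Bool → Bool
  | [], in_, w => in_ && !w
  | ln :: rest, in_, w =>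
    if pvIsHeaderB ln then
      pvE sec pref rest (pvSecTest sec (PySem.Str.strip ln)) (if in_ && !w then true else w)
    else if in_ && pvKeyTest pref (PySem.Str.strip ln) then
      pvE sec pref rest in_ true
    else
      pvE sec pref rest in_ w

theorem pvGoB_nil (sec nl pref : String) (w : Bool) : pvGoB sec nl pref [] w = ([], w) := by
  rw [pvGoB]

theorem pvGoB_cons (sec nl pref h : String) (rest1 : List String) (w : Bool) :
    pvGoB sec nl pref (h :: rest1) w =
      if pvSecTest sec (PySem.Str.strip h) then
        (h :: (pvBT sec nl pref rest1 w).1, (pvBT sec nl pref rest1 w).2)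
      else
        (h :: (pvBF sec nl pref rest1 w).1, (pvBF sec nl pref rest1 w).2) := by
  rw [pvGoB]
  by_cases ht : (pvSecTest sec (PySem.Str.strip h)) = true <;>
    simp [ht, pvBT, pvBF]

-- step lemmas for the A-side loop, the EOF tracker and the B-side composites
theorem loopA_cons_hdr (sec nl pref ln : String) (rest : List String) (in_ w : Bool)
    (hh : pvHdrTest (PySem.Str.strip ln) = true) :
    upsertLoopA sec nl pref (ln :: rest) in_ w =
      ((if in_ && !w then [nl] else []) ++ ln ::
          (upsertLoopA sec nl pref rest (pvSecTest sec (PySem.Str.strip ln)) (if in_ && !w then true else w)).1,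
        (upsertLoopA sec nl pref rest (pvSecTest sec (PySem.Str.strip ln)) (if in_ && !w then true else w)).2) := by
  simp only [upsertLoopA, hh, if_true]

theorem loopA_cons_match (sec nl pref ln : String) (rest : List String) (w : Bool)
    (hh : pvHdrTest (PySem.Str.strip ln) = false)
    (hm : pvKeyTest pref (PySem.Str.strip ln) = true) :
    upsertLoopA sec nl pref (ln :: rest) true w =
      (nl :: (upsertLoopA sec nl pref rest true true).1, (upsertLoopA sec nl pref rest true true).2) := by
  simp only [upsertLoopA, hh, hm, Bool.true_and, if_true, Bool.false_eq_true, if_false]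

theorem loopA_cons_other (sec nl pref ln : String) (rest : List String) (in_ w : Bool)
    (hh : pvHdrTest (PySem.Str.strip ln) = false)
    (hm : (in_ && pvKeyTest pref (PySem.Str.strip ln)) = false) :
    upsertLoopA sec nl pref (ln :: rest) in_ w =
      (ln :: (upsertLoopA sec nl pref rest in_ w).1, (upsertLoopA sec nl pref rest in_ w).2) := by
  simp only [upsertLoopA, hh, hm, Bool.false_eq_true, if_false]

theorem pvE_cons_hdr (sec pref ln : String) (rest : List String) (in_ w : Bool)
    (hh : pvIsHeaderB ln = true) :
    pvE sec pref (ln :: rest) in_ w =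
      pvE sec pref rest (pvSecTest sec (PySem.Str.strip ln)) (if in_ && !w then true else w) := by
  simp only [pvE, hh, if_true]

theorem pvE_cons_nohdr (sec pref ln : String) (rest : List String) (in_ w : Bool)
    (hh : pvIsHeaderB ln = false)
    (hm : (in_ && pvKeyTest pref (PySem.Str.strip ln)) = false) :
    pvE sec pref (ln :: rest) in_ w = pvE sec pref rest in_ w := by
  simp only [pvE, hh, hm, Bool.false_eq_true, if_false]

theorem pvE_cons_match (sec pref ln : String) (rest : List String) (w : Bool)
    (hh : pvIsHeaderB ln = false)
    (hm : pvKeyTest pref (PySem.Str.strip ln) = true) :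
    pvE sec pref (ln :: rest) true w = pvE sec pref rest true true := by
  simp only [pvE, hh, hm, Bool.true_and, if_true, Bool.false_eq_true, if_false]

theorem pvBF_cons_hdr (sec nl pref ln : String) (rest : List String) (w : Bool)
    (hh : pvIsHeaderB ln = true) :
    pvBF sec nl pref (ln :: rest) w =
      ((pvGoB sec nl pref (ln :: rest) w).1, (pvGoB sec nl pref (ln :: rest) w).2) := by
  simp only [pvBF, pvSplitAtHeader, hh, if_true, List.nil_append]

theorem pvBF_cons_nohdr (sec nl pref ln : String) (rest : List String) (w : Bool)
    (hh : pvIsHeaderB ln = false) :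
    pvBF sec nl pref (ln :: rest) w = (ln :: (pvBF sec nl pref rest w).1, (pvBF sec nl pref rest w).2) := by
  simp only [pvBF, pvSplitAtHeader, hh, Bool.false_eq_true, if_false, List.cons_append]

theorem pvBT_cons_hdr (sec nl pref ln : String) (rest : List String) (w : Bool)
    (hh : pvIsHeaderB ln = true) :
    pvBT sec nl pref (ln :: rest) w =
      ((if w then [] else [nl]) ++ (pvGoB sec nl pref (ln :: rest) true).1,
        (pvGoB sec nl pref (ln :: rest) true).2) := by
  cases w <;> simp only [pvBT, pvSplitAtHeader, hh, if_true, Bool.false_eq_true, if_false,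
    pvReplBody, List.nil_append]

theorem pvBT_cons_match (sec nl pref ln : String) (rest : List String) (w : Bool)
    (hh : pvIsHeaderB ln = false)
    (hm : pvKeyTest pref (PySem.Str.strip ln) = true) :
    pvBT sec nl pref (ln :: rest) w = (nl :: (pvBT sec nl pref rest true).1, (pvBT sec nl pref rest true).2) := by
  simp only [pvBT, pvSplitAtHeader, hh, Bool.false_eq_true, if_false, pvReplBody, hm, if_true,
    List.cons_append]
  cases (pvReplBody nl pref (pvSplitAtHeader rest).1 true).2 <;> simp

theorem pvBT_cons_other (sec nl pref ln : String) (rest : List String) (w : Bool)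
    (hh : pvIsHeaderB ln = false)
    (hm : pvKeyTest pref (PySem.Str.strip ln) = false) :
    pvBT sec nl pref (ln :: rest) w = (ln :: (pvBT sec nl pref rest w).1, (pvBT sec nl pref rest w).2) := by
  simp only [pvBT, pvSplitAtHeader, hh, Bool.false_eq_true, if_false, pvReplBody, hm,
    List.cons_append]
  cases (pvReplBody nl pref (pvSplitAtHeader rest).1 w).2 <;> simp

theorem pvCharMain (sec nl pref : String) : ∀ (ls : List String) (w : Bool),
    (upsertLoopA sec nl pref ls false w =
      ((pvBF sec nl pref ls w).1, (pvBF sec nl pref ls w).2 && !(pvE sec pref ls false w)))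
    ∧ (upsertLoopA sec nl pref ls true w =
      ((pvBT sec nl pref ls w).1, (pvBT sec nl pref ls w).2 && !(pvE sec pref ls true w))) := by
  intro ls
  induction ls with
  | nil =>
    intro w
    constructor
    · simp only [upsertLoopA, pvE, pvBF, pvSplitAtHeader, pvGoB_nil, Bool.false_and,
        Bool.false_eq_true, if_false, Bool.not_false, Bool.and_true, List.nil_append]
    · cases w <;>
        simp only [upsertLoopA, pvE, pvBT, pvSplitAtHeader, pvReplBody, pvGoB_nil,
          Bool.not_true, Bool.not_false, if_true, Bool.false_eq_true, if_false,
          Bool.and_true, Bool.and_false, List.nil_append, List.append_nil]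
  | cons ln rest ih =>
    intro w
    by_cases hh : pvIsHeaderB ln = true
    · have hh' : pvHdrTest (PySem.Str.strip ln) = true := hh
      constructor
      · -- false mode, header line
        rw [loopA_cons_hdr sec nl pref ln rest false w hh', pvE_cons_hdr sec pref ln rest false w hh,
          pvBF_cons_hdr sec nl pref ln rest w hh, pvGoB_cons]
        simp only [Bool.false_and, Bool.false_eq_true, if_false, List.nil_append]
        by_cases ht : (pvSecTest sec (PySem.Str.strip ln)) = true
        · rw [ht, if_pos rfl, (ih w).2]
        · have ht' : (pvSecTest sec (PySem.Str.strip ln)) = false := by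
            revert ht; cases (pvSecTest sec (PySem.Str.strip ln)) <;> simp
          rw [ht', if_neg (by simp), (ih w).1]
      · -- true mode, header line
        rw [loopA_cons_hdr sec nl pref ln rest true w hh', pvE_cons_hdr sec pref ln rest true w hh,
          pvBT_cons_hdr sec nl pref ln rest w hh, pvGoB_cons]
        have hw1 : (if true && !w then true else w) = true := by cases w <;> rfl
        have hw2 : (if true && !w then [nl] else ([] : List String)) = (if w then [] else [nl]) := by
          cases w <;> rfl
        rw [hw1, hw2]
        by_cases ht : (pvSecTest sec (PySem.Str.strip ln)) = true
        · rw [ht, if_pos rfl, (ih true).2]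
          try simp only [List.append_assoc, List.cons_append, List.nil_append]
        · have ht' : (pvSecTest sec (PySem.Str.strip ln)) = false := by
            revert ht; cases (pvSecTest sec (PySem.Str.strip ln)) <;> simp
          rw [ht']
          simp only [Bool.false_eq_true, if_false]
          rw [(ih true).1]
          try simp only [List.append_assoc, List.cons_append, List.nil_append]
    · have hhb : pvIsHeaderB ln = false := by
        revert hh; cases (pvIsHeaderB ln) <;> simp
      have hh' : pvHdrTest (PySem.Str.strip ln) = false := hhb
      constructor
      · -- false mode, non-header line
        rw [loopA_cons_other sec nl pref ln rest false w hh' (by simp),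
          pvE_cons_nohdr sec pref ln rest false w hhb (by simp),
          pvBF_cons_nohdr sec nl pref ln rest w hhb, (ih w).1]
      · -- true mode, non-header line
        by_cases hm : pvKeyTest pref (PySem.Str.strip ln) = true
        · rw [loopA_cons_match sec nl pref ln rest w hh' hm,
            pvE_cons_match sec pref ln rest w hhb hm,
            pvBT_cons_match sec nl pref ln rest w hhb hm, (ih true).2]
        · have hm' : pvKeyTest pref (PySem.Str.strip ln) = false := by
            revert hm; cases (pvKeyTest pref (PySem.Str.strip ln)) <;> simp
          rw [loopA_cons_other sec nl pref ln rest true w hh' (by rw [hm']; rfl),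
            pvE_cons_nohdr sec pref ln rest true w hhb (by rw [hm']; rfl),
            pvBT_cons_other sec nl pref ln rest w hhb hm', (ih w).2]

-- if the EOF append fires in A's false-mode run, B's flag is true
theorem pvRepl_true (nl pref : String) : ∀ body : List String, (pvReplBody nl pref body true).2 = true := by
  intro body
  induction body with
  | nil => rfl
  | cons a t ih => simp only [pvReplBody]; split <;> exact ih

theorem pvGoB_true_flag (sec nl pref : String) : ∀ (n : Nat) (ls : List String), ls.length ≤ n →
    (pvGoB sec nl pref ls true).2 = true := by
  intro n
  induction n with
  | zero =>
    intro ls h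
    cases ls with
    | nil => rw [pvGoB_nil]
    | cons a t => simp at h
  | succ n ih =>
    intro ls h
    cases ls with
    | nil => rw [pvGoB_nil]
    | cons hd tl =>
      rw [pvGoB_cons]
      split
      · show (pvBT sec nl pref tl true).2 = true
        simp only [pvBT, pvRepl_true nl pref, if_true]
        exact ih (pvSplitAtHeader tl).2
          (le_trans (pvSplitAtHeader_length_le tl) (Nat.le_of_succ_le_succ h))
      · show (pvBF sec nl pref tl true).2 = true
        simp only [pvBF]
        exact ih (pvSplitAtHeader tl).2
          (le_trans (pvSplitAtHeader_length_le tl) (Nat.le_of_succ_le_succ h))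

theorem pvBT_flag (sec nl pref : String) (ls : List String) (w : Bool) :
    (pvBT sec nl pref ls w).2 = true := by
  simp only [pvBT]
  cases hr : (pvReplBody nl pref (pvSplitAtHeader ls).1 w).2 <;>
    simp only [Bool.false_eq_true, if_false, if_true] <;>
    exact pvGoB_true_flag sec nl pref _ _ le_rfl

theorem pvBF_flag_of_E (sec nl pref : String) : ∀ (ls : List String) (w : Bool),
    pvE sec pref ls false w = true → (pvBF sec nl pref ls w).2 = true := by
  intro ls
  induction ls with
  | nil => intro w hE; exact absurd hE (by simp [pvE])
  | cons ln rest ih =>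
    intro w hE
    by_cases hh : pvIsHeaderB ln = true
    · rw [pvE_cons_hdr sec pref ln rest false w hh] at hE
      rw [pvBF_cons_hdr sec nl pref ln rest w hh]
      show (pvGoB sec nl pref (ln :: rest) w).2 = true
      rw [pvGoB_cons]
      by_cases ht : (pvSecTest sec (PySem.Str.strip ln)) = true
      · rw [ht, if_pos rfl]
        exact pvBT_flag sec nl pref rest w
      · have ht' : (pvSecTest sec (PySem.Str.strip ln)) = false := by
          revert ht; cases (pvSecTest sec (PySem.Str.strip ln)) <;> simp
        rw [ht'] at hE
        rw [ht']
        simp only [Bool.false_eq_true, if_false]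
        simp only [Bool.false_and, Bool.false_eq_true, if_false] at hE
        exact ih w hE
    · have hhb : pvIsHeaderB ln = false := by
        revert hh; cases (pvIsHeaderB ln) <;> simp
      rw [pvE_cons_nohdr sec pref ln rest false w hhb (by simp)] at hE
      rw [pvBF_cons_nohdr sec nl pref ln rest w hhb]
      show (pvBF sec nl pref rest w).2 = true
      exact ih w hE

-- closed-form characterisation of pvE, matching D_'s shape
def pvEClosed (sec pref : String) (ls : List String) (in_ w : Bool) : Bool :=
  match ls.reverse.dropWhile (fun l => !pvIsHeaderB l) with
  | [] => in_ && !w && ls.all (fun l => !pvKeyTest pref (PySem.Str.strip l))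
  | h :: t =>
    (pvSecTest sec (PySem.Str.strip h))
      && (ls.reverse.takeWhile (fun l => !pvIsHeaderB l)).all
           (fun l => !pvKeyTest pref (PySem.Str.strip l))
      && !(w || in_ || t.any (fun l => pvIsHeaderB l && (pvSecTest sec (PySem.Str.strip l))))

theorem pvE_char (sec pref : String) : ∀ (ls : List String) (in_ w : Bool),
    pvE sec pref ls in_ w = pvEClosed sec pref ls in_ w := by
  intro ls
  induction ls with
  | nil => intro in_ w; simp [pvE, pvEClosed]
  | cons ln rest ih =>
    intro in_ w
    by_cases hr : rest.reverse.dropWhile (fun l => !pvIsHeaderB l) = []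
    · -- rest contains no header line
      have hall : ∀ x ∈ rest.reverse, (!pvIsHeaderB x) = true := List.dropWhile_eq_nil_iff.1 hr
      have htake : rest.reverse.takeWhile (fun l => !pvIsHeaderB l) = rest.reverse :=
        List.takeWhile_eq_self_iff.2 hall
      have hCl : ∀ (i v : Bool), pvEClosed sec pref (ln :: rest) i v =
          (match (if (!pvIsHeaderB ln) = true then [] else [ln]) with
           | [] => i && !v && (ln :: rest).all (fun l => !pvKeyTest pref (PySem.Str.strip l))
           | h :: t =>
             (pvSecTest sec (PySem.Str.strip h))
               && (rest.all (fun l => !pvKeyTest pref (PySem.Str.strip l)))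
               && !(v || i || t.any (fun l => pvIsHeaderB l && (pvSecTest sec (PySem.Str.strip l))))) := by
        intro i v
        simp only [pvEClosed, List.reverse_cons, List.dropWhile_append, hr, List.isEmpty_nil,
          if_true, List.dropWhile_cons, List.dropWhile_nil, List.takeWhile_append, htake,
          List.takeWhile_cons, List.takeWhile_nil]
        by_cases hhl : pvIsHeaderB ln = true
        · simp [hhl, List.all_reverse]
        · have hhl' : pvIsHeaderB ln = false := by
            revert hhl; cases (pvIsHeaderB ln) <;> simp
          simp [hhl']
      by_cases hh : pvIsHeaderB ln = true
      · rw [pvE_cons_hdr sec pref ln rest in_ w hh, ih, hCl]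
        simp only [hh, Bool.not_true, Bool.false_eq_true, if_false]
        have hClRest : pvEClosed sec pref rest (pvSecTest sec (PySem.Str.strip ln))
            (if in_ && !w then true else w) =
            ((pvSecTest sec (PySem.Str.strip ln)) && !(if in_ && !w then true else w)
              && rest.all (fun l => !pvKeyTest pref (PySem.Str.strip l))) := by
          simp only [pvEClosed, hr]
        rw [hClRest]
        cases in_ <;> cases w <;>
          simp [Bool.and_comm]
      · have hhb : pvIsHeaderB ln = false := by
          revert hh; cases (pvIsHeaderB ln) <;> simp
        have hClRest : ∀ v, pvEClosed sec pref rest in_ v =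
            (in_ && !v && rest.all (fun l => !pvKeyTest pref (PySem.Str.strip l))) := by
          intro v; simp only [pvEClosed, hr]
        rw [hCl]
        simp only [hhb, Bool.not_false, if_true]
        by_cases hm : pvKeyTest pref (PySem.Str.strip ln) = true
        · cases in_
          · rw [pvE_cons_nohdr sec pref ln rest false w hhb (by simp), ih, hClRest]
            simp
          · rw [pvE_cons_match sec pref ln rest w hhb hm, ih, hClRest]
            simp [hm]
        · have hm' : pvKeyTest pref (PySem.Str.strip ln) = false := by
            revert hm; cases (pvKeyTest pref (PySem.Str.strip ln)) <;> simp
          rw [pvE_cons_nohdr sec pref ln rest in_ w hhb (by rw [hm']; exact Bool.and_false in_), ih, hClRest]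
          simp [hm']
    · -- rest contains a header line
      obtain ⟨h, t, hrt⟩ : ∃ h t, rest.reverse.dropWhile (fun l => !pvIsHeaderB l) = h :: t := by
        cases hd : rest.reverse.dropWhile (fun l => !pvIsHeaderB l) with
        | nil => exact absurd hd hr
        | cons a b => exact ⟨a, b, rfl⟩
      have htlen : (rest.reverse.takeWhile (fun l => !pvIsHeaderB l)).length ≠ rest.reverse.length := by
        intro hlen
        have hlen2 : (rest.reverse.takeWhile (fun l => !pvIsHeaderB l)).length
            + (rest.reverse.dropWhile (fun l => !pvIsHeaderB l)).length = rest.reverse.length := by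
          rw [← List.length_append, List.takeWhile_append_dropWhile]
        have h2 : (rest.reverse.dropWhile (fun l => !pvIsHeaderB l)).length = 0 := by omega
        rw [hrt] at h2; simp at h2
      have hCl : ∀ (i v : Bool), pvEClosed sec pref (ln :: rest) i v =
          ((pvSecTest sec (PySem.Str.strip h))
            && (rest.reverse.takeWhile (fun l => !pvIsHeaderB l)).all
                 (fun l => !pvKeyTest pref (PySem.Str.strip l))
            && !(v || i || (t.any (fun l => pvIsHeaderB l && (pvSecTest sec (PySem.Str.strip l)))
                  || (pvIsHeaderB ln && (pvSecTest sec (PySem.Str.strip ln)))))) := by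
        intro i v
        simp only [pvEClosed, List.reverse_cons, List.dropWhile_append, hrt, List.isEmpty_cons,
          Bool.false_eq_true, if_false, List.takeWhile_append, if_neg htlen, List.cons_append,
          List.any_append, List.any_cons, List.any_nil, Bool.or_false]
      have hClRest : ∀ (i v : Bool), pvEClosed sec pref rest i v =
          ((pvSecTest sec (PySem.Str.strip h))
            && (rest.reverse.takeWhile (fun l => !pvIsHeaderB l)).all
                 (fun l => !pvKeyTest pref (PySem.Str.strip l))
            && !(v || i || t.any (fun l => pvIsHeaderB l && (pvSecTest sec (PySem.Str.strip l))))) := by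
        intro i v
        simp only [pvEClosed, hrt]
      by_cases hh : pvIsHeaderB ln = true
      · rw [pvE_cons_hdr sec pref ln rest in_ w hh, ih, hCl, hClRest]
        simp only [hh, Bool.true_and]
        cases in_ <;> cases w <;>
          cases htg : (pvSecTest sec (PySem.Str.strip ln)) <;>
          simp [Bool.or_comm]
      · have hhb : pvIsHeaderB ln = false := by
          revert hh; cases (pvIsHeaderB ln) <;> simp
        rw [hCl]
        simp only [hhb, Bool.false_and, Bool.or_false]
        by_cases hm : pvKeyTest pref (PySem.Str.strip ln) = true
        · cases in_
          · rw [pvE_cons_nohdr sec pref ln rest false w hhb (by simp), ih, hClRest]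
          · rw [pvE_cons_match sec pref ln rest w hhb hm, ih, hClRest]
            simp
        · have hm' : pvKeyTest pref (PySem.Str.strip ln) = false := by
            revert hm; cases (pvKeyTest pref (PySem.Str.strip ln)) <;> simp
          rw [pvE_cons_nohdr sec pref ln rest in_ w hhb (by rw [hm']; exact Bool.and_false in_), ih, hClRest]

theorem pvD_iff_E (lines : List String) (section_ key value : String) :
    D_upsert_key lines section_ key value ↔
      pvE (PySem.Str.lower ("[" ++ section_ ++ "]")) (PySem.Str.lower key ++ " ") lines false false = true := by
  rw [pvE_char]
  simp only [D_upsert_key]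
  simp only [show (fun l => !pvHdrTest (PySem.Str.strip l)) = (fun l => !pvIsHeaderB l) from rfl]
  cases hd : lines.reverse.dropWhile (fun l => !pvIsHeaderB l) with
  | nil => simp [pvEClosed, hd]
  | cons h t =>
    simp only [pvEClosed, hd, List.headI_cons, List.tail_cons, ne_eq, reduceCtorEq,
      not_false_eq_true, true_and, Bool.or_self, Bool.false_or,
      Bool.and_eq_true, Bool.not_eq_true']
    simp [List.all_eq_true, pvIsHeaderB, and_assoc]
    intro _
    constructor
    · rintro ⟨h1, h2⟩
      refine ⟨h2, fun x hx hhx => ?_⟩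
      rcases h1 x hx with hc | hc
      · rw [hhx] at hc; cases hc
      · exact hc
    · rintro ⟨h2, h1⟩
      refine ⟨fun x hx => ?_, h2⟩
      cases hq : pvHdrTest (PySem.Str.strip x)
      · exact Or.inl rfl
      · exact Or.inr (h1 x hx hq)

-- ===== VERDICT (by name: the statement is the Claim_ definition above) =====
theorem upsert_key_spec : Claim_unchanged_upsert_key := by
  intro lines section_ key value _ hnD
  have h := (pvCharMain (PySem.Str.lower ("[" ++ section_ ++ "]")) (key ++ " = " ++ value ++ "\n")
      (PySem.Str.lower key ++ " ") lines false).1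
  have hE : pvE (PySem.Str.lower ("[" ++ section_ ++ "]")) (PySem.Str.lower key ++ " ") lines false false = false := by
    by_contra hc
    exact hnD ((pvD_iff_E lines section_ key value).2 (by revert hc; cases hE' : pvE _ _ lines false false <;> simp))
  simp only [upsert_key, upsert_key_alt, h, hE, Bool.not_false, Bool.and_true]
  rfl

theorem upsert_key_changed : Claim_changed_upsert_key := by
  unfold Claim_changed_upsert_key
  refine ⟨by decide, by decide, by decide, ?_, by decide⟩
  show upsert_key_alt ["[s]\n"] "s" "k" "v" = (["[s]\n", "k = v\n"], true)
  have hh : pvIsHeaderB "[s]\n" = true := by decide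
  have ht : pvSecTest (PySem.Str.lower ("[" ++ "s" ++ "]")) (PySem.Str.strip "[s]\n") = true := by decide
  simp only [upsert_key_alt, pvSplitAtHeader, hh, if_true, pvGoB_cons, ht, pvBT, pvReplBody, pvGoB_nil]
  decide

theorem upsert_key_tight : Claim_exact_upsert_key := by
  intro lines section_ key value _ hD
  have hE := (pvD_iff_E lines section_ key value).1 hD
  have h := (pvCharMain (PySem.Str.lower ("[" ++ section_ ++ "]")) (key ++ " = " ++ value ++ "\n")
      (PySem.Str.lower key ++ " ") lines false).1
  have hBf := pvBF_flag_of_E (PySem.Str.lower ("[" ++ section_ ++ "]")) (key ++ " = " ++ value ++ "\n")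
      (PySem.Str.lower key ++ " ") lines false hE
  intro hcontra
  have h2 : (upsert_key lines section_ key value).2 = (upsert_key_alt lines section_ key value).2 := by
    rw [hcontra]
  simp only [upsert_key, upsert_key_alt, h, hE] at h2
  rw [show ((pvGoB (PySem.Str.lower ("[" ++ section_ ++ "]")) (key ++ " = " ++ value ++ "\n") (PySem.Str.lower key ++ " ") (pvSplitAtHeader lines).2 false).2 = (pvBF (PySem.Str.lower ("[" ++ section_ ++ "]")) (key ++ " = " ++ value ++ "\n") (PySem.Str.lower key ++ " ") lines false).2) from rfl] at h2
  rw [hBf] at h2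
  simp at h2
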